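-- pv_equiv track=rewrite | github.com/Silverdono/secret-sharing-protocols | ledger/functions.py | generateResultMatrix
-- ===== SOURCE A (Python) =====
-- def generateVandermondeMatrix(l, t, w, q):
--
--     vandermonde = []
--
--     for i in range(l):
--         row = []
--         for j in range(l + t):
--             tmp = pow(w, i * j, q)
--             if tmp == 0:
--                 tmp = 1
--             row.append(tmp)
--         vandermonde.append(row)
--
--     return vandermonde
--
-- def generateResultMatrix(l, t, w, q, h, hS):
--
--     vandermonde = generateVandermondeMatrix(l, t, w, q)
--
--     resultMatrix = []
--
--     for i in range(l):
--         row = []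
--         for j in range(l + t):
--             temp = vandermonde[i][j] * hS[j]
--             result = pow(h,temp)
--             row.append(result)
--         resultMatrix.append(row)
--
--     return resultMatrix
-- ===== SOURCE B (Python) =====
-- def generateResultMatrix(l, t, w, q, h, hS):
--     # One fused pass: per row i, a running modular prefix product replaces
--     # pow(w, i*j, q) per cell, and no intermediate Vandermonde matrix is built.
--     resultMatrix = []
--     for i in range(l):
--         base = pow(w, i, q)
--         prod = 1 % q
--         row = []
--         for j in range(l + t):
--             v = prod if prod != 0 else 1
--             row.append(pow(h, v * hS[j]))
--             prod = prod * base % q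
--         resultMatrix.append(row)
--     return resultMatrix
-- ===== Notes on version B (the rewrite author's own statement) =====
-- stated objective: alternative
-- what changed: B fuses A's two matrix-building passes into a single loop and replaces the per-cell modular exponentiation pow(w, i*j, q) by an incremental running prefix product per row (base = pow(w, i, q), prod = prod*base % q), skipping the intermediate Vandermonde matrix entirely.
-- outside the precondition, e.g. on generateResultMatrix(2, -3, 5, 0, 2, []): A returns [[], []], B raises ValueError; on generateResultMatrix(1, 0, 3, 5, 2, [-1]): A returns [[0.5]], B returns [[0.5]]; on generateResultMatrix(1, 0, 3, -2, 2, [0]): A returns [[1]], B returns [[1]]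
import Mathlib
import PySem

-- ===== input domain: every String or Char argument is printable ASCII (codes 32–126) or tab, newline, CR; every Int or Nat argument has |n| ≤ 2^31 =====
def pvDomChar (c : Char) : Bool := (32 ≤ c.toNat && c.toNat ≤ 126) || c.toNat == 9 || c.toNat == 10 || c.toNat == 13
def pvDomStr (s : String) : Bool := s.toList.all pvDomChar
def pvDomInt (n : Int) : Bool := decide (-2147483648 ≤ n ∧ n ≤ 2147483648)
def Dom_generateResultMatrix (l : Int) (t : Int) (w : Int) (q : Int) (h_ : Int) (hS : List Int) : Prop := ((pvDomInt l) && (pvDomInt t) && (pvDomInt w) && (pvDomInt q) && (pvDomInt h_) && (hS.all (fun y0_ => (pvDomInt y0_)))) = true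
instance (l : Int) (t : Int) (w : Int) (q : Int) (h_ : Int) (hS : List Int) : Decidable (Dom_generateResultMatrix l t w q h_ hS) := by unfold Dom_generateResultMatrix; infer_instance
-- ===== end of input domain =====

-- B fuses A's two matrix-building passes into one loop and replaces the per-cell pow(w, i*j, q)
-- by an incremental running modular prefix product per row (objective: alternative decomposition).

-- ===== PORT A =====
-- helper generateVandermondeMatrix, transliterated (pow(w, i*j, q) = PySem.Int.powMod; i*j ≥ 0 on range values)
def pvGenerateVandermondeMatrix (l : Int) (t : Int) (w : Int) (q : Int) : List (List Int) :=
  (PySem.List.pyRange 0 l 1).foldl (fun vandermonde i =>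
    vandermonde ++ [(PySem.List.pyRange 0 (l + t) 1).foldl (fun row j =>
      let tmp := PySem.Int.powMod w (i * j).toNat q
      let tmp := if tmp = 0 then 1 else tmp
      row ++ [tmp]) []]) []

-- pow(h, temp): under Pre_ temp ≥ 0, so h_ ^ temp.toNat is exact; list indexing via pyGetD
-- (in range under Pre_, where Python's indexing raises Pre_ excludes the input)
def generateResultMatrix (l : Int) (t : Int) (w : Int) (q : Int) (h_ : Int) (hS : List Int) : List (List Int) :=
  let vandermonde := pvGenerateVandermondeMatrix l t w q
  (PySem.List.pyRange 0 l 1).foldl (fun resultMatrix i =>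
    resultMatrix ++ [(PySem.List.pyRange 0 (l + t) 1).foldl (fun row j =>
      let temp := PySem.List.pyGetD (PySem.List.pyGetD vandermonde i []) j 0 * PySem.List.pyGetD hS j 0
      let result := h_ ^ temp.toNat
      row ++ [result]) []]) []

-- ===== PORT B =====
def generateResultMatrix_alt (l : Int) (t : Int) (w : Int) (q : Int) (h_ : Int) (hS : List Int) : List (List Int) :=
  (PySem.List.pyRange 0 l 1).foldl (fun resultMatrix i =>
    let base := PySem.Int.powMod w i.toNat q
    let st := (PySem.List.pyRange 0 (l + t) 1).foldl (fun (s : Int × List Int) j =>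
      let v := if s.1 ≠ 0 then s.1 else 1
      (PySem.Int.mod (s.1 * base) q, s.2 ++ [h_ ^ (v * PySem.List.pyGetD hS j 0).toNat]))
      (PySem.Int.mod 1 q, [])
    resultMatrix ++ [st.2]) []

-- ===== PRECONDITION & SPEC =====
-- Pre_ excludes: q ≤ 0 when l > 0 (q = 0 makes pow raise ValueError — in B already at base = pow(w, i, q);
-- with q < 0 or a negative hS entry among the first l+t, pow(h, temp) has a negative exponent and returns a
-- float, not an int), and hS shorter than l+t when the inner loop is nonempty (IndexError).
def Pre_generateResultMatrix (l : Int) (t : Int) (w : Int) (q : Int) (h_ : Int) (hS : List Int) : Prop :=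
  0 < l → (0 < q ∧ l + t ≤ (hS.length : Int) ∧ ∀ x ∈ hS.take (l + t).toNat, 0 ≤ x)
instance (l : Int) (t : Int) (w : Int) (q : Int) (h_ : Int) (hS : List Int) : Decidable (Pre_generateResultMatrix l t w q h_ hS) := by unfold Pre_generateResultMatrix; infer_instance

def pvWitness_generateResultMatrix : Int × Int × Int × Int × Int × List Int := (2, 1, 3, 5, 2, [1, 0, 2])

def Spec_generateResultMatrix (l : Int) (t : Int) (w : Int) (q : Int) (h_ : Int) (hS : List Int) (out : List (List Int)) : Prop := out = generateResultMatrix_alt l t w q h_ hS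
instance (l : Int) (t : Int) (w : Int) (q : Int) (h_ : Int) (hS : List Int) (out : List (List Int)) : Decidable (Spec_generateResultMatrix l t w q h_ hS out) := by unfold Spec_generateResultMatrix; infer_instance

-- ===== CLAIM =====
def Claim_equal_generateResultMatrix : Prop := ∀ (l : Int) (t : Int) (w : Int) (q : Int) (h_ : Int) (hS : List Int), Dom_generateResultMatrix l t w q h_ hS → Pre_generateResultMatrix l t w q h_ hS → Spec_generateResultMatrix l t w q h_ hS (generateResultMatrix l t w q h_ hS)

-- ===== LEMMAS AND PROOFS =====

-- mod is multiplicative in each factor when the modulus is positive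
lemma pvModMulL (a b q : Int) (hq : 0 < q) :
    PySem.Int.mod (PySem.Int.mod a q * b) q = PySem.Int.mod (a * b) q := by
  simp only [PySem.Int.mod_eq_emod_of_pos hq]
  rw [Int.mul_emod, Int.emod_emod_of_dvd a dvd_rfl, ← Int.mul_emod]

lemma pvModMulR (a b q : Int) (hq : 0 < q) :
    PySem.Int.mod (a * PySem.Int.mod b q) q = PySem.Int.mod (a * b) q := by
  simp only [PySem.Int.mod_eq_emod_of_pos hq]
  rw [Int.mul_emod, Int.emod_emod_of_dvd b dvd_rfl, ← Int.mul_emod]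

-- B's inner fold, fully characterised: running product and emitted row
lemma pvRowB (w q h_ : Int) (hS : List Int) (a : Nat) (hq : 0 < q) (m : Nat) :
    (PySem.List.pyRange 0 (m : Int) 1).foldl (fun (s : Int × List Int) j =>
      let v := if s.1 ≠ 0 then s.1 else 1
      (PySem.Int.mod (s.1 * PySem.Int.mod (w ^ a) q) q,
       s.2 ++ [h_ ^ (v * PySem.List.pyGetD hS j 0).toNat]))
      (PySem.Int.mod 1 q, []) =
    (PySem.Int.mod (w ^ (a * m)) q,
     (PySem.List.pyRange 0 (m : Int) 1).map (fun j =>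
       h_ ^ ((let tmp := PySem.Int.mod (w ^ (a * j.toNat)) q;
              if tmp = 0 then 1 else tmp) * PySem.List.pyGetD hS j 0).toNat)) := by
  induction m with
  | zero => simp [PySem.List.pyRange_one_eq_nil]
  | succ m ih =>
      have hcast : ((m : Int) + 1) = ((m + 1 : Nat) : Int) := by push_cast; ring
      rw [← hcast, PySem.List.pyRange_one_succ_right (by positivity), List.foldl_append,
          List.map_append, ih]
      simp only [List.foldl_cons, List.foldl_nil, List.map_cons, List.map_nil, Prod.mk.injEq]
      constructor
      · rw [pvModMulL _ _ _ hq, pvModMulR _ _ _ hq, ← pow_add, Nat.mul_succ]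
      · congr 1
        simp only [Int.toNat_natCast]
        by_cases h : PySem.Int.mod (w ^ (a * m)) q = 0 <;> simp [h]

-- A's Vandermonde matrix as a map of maps
lemma pvVandEq (l t w q : Int) :
    pvGenerateVandermondeMatrix l t w q =
    (PySem.List.pyRange 0 l 1).map (fun i =>
      (PySem.List.pyRange 0 (l + t) 1).map (fun j =>
        let tmp := PySem.Int.powMod w (i * j).toNat q
        if tmp = 0 then 1 else tmp)) := by
  unfold pvGenerateVandermondeMatrix
  rw [PySem.List.foldl_append_singleton_eq_map]
  simp only [List.nil_append]
  refine List.map_congr_left (fun i _ => ?_)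
  rw [PySem.List.foldl_append_singleton_eq_map]
  simp

theorem generateResultMatrix_spec : Claim_equal_generateResultMatrix := by
  intro l t w q h_ hS _ hpre
  unfold Spec_generateResultMatrix generateResultMatrix generateResultMatrix_alt
  by_cases hl : 0 < l
  · obtain ⟨hq, hlen, _⟩ := hpre hl
    simp only [PySem.List.foldl_append_singleton_eq_map, List.nil_append]
    refine List.map_congr_left (fun i hi => ?_)
    obtain ⟨hi0, hil⟩ := (PySem.List.mem_pyRange_one).1 hi
    simp only [PySem.Int.powMod_eq]
    by_cases hn : l + t ≤ 0
    · simp [PySem.List.pyRange_one_eq_nil hn]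
    · have hmn : (((l + t).toNat : Nat) : Int) = l + t := Int.toNat_of_nonneg (by omega)
      rw [← hmn, pvRowB w q h_ hS i.toNat hq (l + t).toNat]
      refine List.map_congr_left (fun j hj => ?_)
      obtain ⟨hj0, hjn⟩ := (PySem.List.mem_pyRange_one).1 hj
      rw [pvVandEq,
          PySem.List.pyGetD_map_pyRange_of_nonneg _ _ _ _ hi0 hil,
          PySem.List.pyGetD_map_pyRange_of_nonneg _ _ _ _ hj0 (by omega : j < l + t)]
      have hij : (i * j).toNat = i.toNat * j.toNat := by
        rw [← Int.toNat_of_nonneg hi0, ← Int.toNat_of_nonneg hj0, ← Nat.cast_mul,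
            Int.toNat_natCast, Int.toNat_natCast, Int.toNat_natCast]
      simp only [PySem.Int.powMod_eq, hij]
  · simp [PySem.List.pyRange_one_eq_nil (le_of_not_gt hl)]
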